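-- pv_equiv track=rewrite | github.com/skywaLKer518/recsys | lstm/lstm_class.py | form_sequence
-- ===== SOURCE A (Python) =====
-- def form_sequence(data, maxlen=100):
--     """
--     Args:
--       data = [(u,i,week)]
--     Return:
--       d : [(user_id, [item_id])]
--     """
--
--     users = []
--     items = []
--     d = {}  # d[u] = [(i,week)]
--     for u, i, week in data:
--         if not u in d:
--             d[u] = []
--         d[u].append((i, week))
--
--     dd = []
--     n_all_item = 0
--     n_rest_item = 0
--     for u in d:
--         tmp = sorted(d[u], key=lambda x: x[1])
--         n_all_item += len(tmp)
--         while True: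
--             new_tmp = [x[0] for x in tmp][:maxlen]
--             n_rest_item += len(new_tmp)
--             # make sure every sequence has at least one item
--             if len(new_tmp) > 0:
--                 dd.append((u, new_tmp))
--             if len(tmp) <= maxlen:
--                 break
--             else:
--                 if len(tmp) - maxlen <= 7:
--                     tmp = tmp[maxlen - 10:]
--                 else:
--                     tmp = tmp[maxlen:]
--
--     # count below not valid any more
--     # mylog("All item: {} Rest item: {} Remove item: {}".format(n_all_item, n_rest_item, n_all_item - n_rest_item))
--
--     return dd
-- ===== SOURCE B (Python) =====
-- def form_sequence(data, maxlen=100):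
--     """
--     Args:
--       data = [(u,i,week)]
--     Return:
--       d : [(user_id, [item_id])]
--     """
--     order = []
--     for u, _, _ in data:
--         if u not in order:
--             order.append(u)
--
--     def chunks(items):
--         if len(items) <= maxlen:
--             return [items]
--         rest = items[maxlen - 10:] if len(items) - maxlen <= 7 else items[maxlen:]
--         return [items[:maxlen]] + chunks(rest)
--
--     return [(u, c)
--             for u in order
--             for c in chunks([i for _, i, _ in
--                              sorted([t for t in data if t[0] == u],
--                                     key=lambda t: t[2])])]
-- ===== Notes on version B (the rewrite author's own statement) =====
-- stated objective: alternative
-- what changed: B drops A's dict grouping and destructive while-loop re-slicing: it records users in first-appearance order, then for each user filters and sorts that user's events and builds the windows with a recursive chunks function, assembling the result as one comprehension; Pre_ excludes only the maxlen values (maxlen <= 4 or maxlen == 10, with some user holding more than maxlen events) on which A's while loop never terminates.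
import Mathlib
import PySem

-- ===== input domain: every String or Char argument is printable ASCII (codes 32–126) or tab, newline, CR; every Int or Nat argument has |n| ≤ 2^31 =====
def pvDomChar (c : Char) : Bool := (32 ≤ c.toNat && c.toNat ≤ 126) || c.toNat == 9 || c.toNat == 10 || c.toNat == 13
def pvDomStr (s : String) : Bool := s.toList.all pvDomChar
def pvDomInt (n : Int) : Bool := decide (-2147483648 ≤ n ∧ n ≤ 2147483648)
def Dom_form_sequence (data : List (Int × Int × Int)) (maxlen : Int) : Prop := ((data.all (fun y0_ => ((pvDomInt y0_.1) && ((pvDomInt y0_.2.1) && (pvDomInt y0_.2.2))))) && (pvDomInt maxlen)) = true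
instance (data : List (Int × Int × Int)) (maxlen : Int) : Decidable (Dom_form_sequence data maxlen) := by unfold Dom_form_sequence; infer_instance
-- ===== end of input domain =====

-- B replaces A's dict grouping and destructive while-loop re-slicing by a first-appearance
-- user list, a per-user filter-and-sort, and a recursive chunking function (alternative
-- decomposition; not claimed faster).

-- ===== PORT A =====
-- grouping loop of A ('if not u in d: d[u] = []' then 'd[u].append((i, week))';
-- the append is Dict.modify, exact here because the key is always present at that point);
-- the dead accumulators users/items/n_all_item/n_rest_item of A are omitted (they do not reach the result)
def pvAGroup (data : List (Int × Int × Int)) : PySem.Dict Int (List (Int × Int)) :=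
  data.foldl
    (fun d y =>
      (if d.contains y.1 then d else d.insert y.1 []).modify y.1 []
        (fun l => l ++ [(y.2.1, y.2.2)]))
    PySem.Dict.empty

-- A's 'while True' loop; the fuel argument is instantiated with len(tmp)+1, which bounds the
-- number of iterations on every input admitted by Pre_ (each non-final iteration strictly shortens tmp)
def pvAWhile (maxlen u : Int) : Nat → List (Int × Int) → List (Int × List Int) → List (Int × List Int)
  | 0, _, dd => dd
  | fuel + 1, tmp, dd =>
    let new_tmp := PySem.List.slice (tmp.map (fun x => x.1)) none (some maxlen)
    let dd' := if 0 < new_tmp.length then dd ++ [(u, new_tmp)] else dd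
    if (tmp.length : Int) ≤ maxlen then dd'
    else if (tmp.length : Int) - maxlen ≤ 7 then
      pvAWhile maxlen u fuel (PySem.List.slice tmp (some (maxlen - 10)) none) dd'
    else
      pvAWhile maxlen u fuel (PySem.List.slice tmp (some maxlen) none) dd'

def form_sequence (data : List (Int × Int × Int)) (maxlen : Int) : List (Int × List Int) :=
  (pvAGroup data).items.foldl
    (fun dd p =>
      let tmp := PySem.List.sorted p.2 (fun x => x.2)
      pvAWhile maxlen p.1 (tmp.length + 1) tmp dd)
    []

-- ===== PORT B =====
-- B's recursive chunks helper; fuel instantiated with len(items)+1 bounds the recursion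
-- depth on every input admitted by Pre_
def pvBChunks (maxlen : Int) : Nat → List Int → List (List Int)
  | 0, _ => []
  | fuel + 1, items =>
    if (items.length : Int) ≤ maxlen then [items]
    else
      let rest :=
        if (items.length : Int) - maxlen ≤ 7 then
          PySem.List.slice items (some (maxlen - 10)) none
        else PySem.List.slice items (some maxlen) none
      PySem.List.slice items none (some maxlen) :: pvBChunks maxlen fuel rest

-- B's inner comprehension: this user's items, sorted by week
def pvBItems (data : List (Int × Int × Int)) (u : Int) : List Int :=
  (PySem.List.sorted (data.filter (fun t => t.1 == u)) (fun t => t.2.2)).map (fun t => t.2.1)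

def form_sequence_alt (data : List (Int × Int × Int)) (maxlen : Int) : List (Int × List Int) :=
  let order := data.foldl (fun o y => if o.contains y.1 then o else o ++ [y.1]) ([] : List Int)
  order.flatMap (fun u =>
    (pvBChunks maxlen ((pvBItems data u).length + 1) (pvBItems data u)).map (fun c => (u, c)))

-- ===== PRECONDITION & SPEC =====
-- Pre_ excludes exactly the inputs on which A's 'while True' loop never terminates: whenever
-- maxlen ≤ 4 or maxlen = 10 and some user has more events than maxlen, the re-slicing step
-- stops shrinking tmp and A loops forever (no value is returned there).
def Pre_form_sequence (data : List (Int × Int × Int)) (maxlen : Int) : Prop :=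
  (5 ≤ maxlen ∧ maxlen ≠ 10) ∨
    ∀ y ∈ data, ((data.countP (fun z => z.1 == y.1) : Int) ≤ maxlen)
instance (data : List (Int × Int × Int)) (maxlen : Int) : Decidable (Pre_form_sequence data maxlen) := by unfold Pre_form_sequence; infer_instance

def pvWitness_form_sequence : (List (Int × Int × Int)) × Int := ([(1, 2, 3), (1, 4, 1), (2, 5, 0)], 100)

def Spec_form_sequence (data : List (Int × Int × Int)) (maxlen : Int) (out : List (Int × List Int)) : Prop := out = form_sequence_alt data maxlen
instance (data : List (Int × Int × Int)) (maxlen : Int) (out : List (Int × List Int)) : Decidable (Spec_form_sequence data maxlen out) := by unfold Spec_form_sequence; infer_instance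

-- ===== CLAIM (what is proved, stated in full; the proofs are below) =====
def Claim_equal_form_sequence : Prop := ∀ (data : List (Int × Int × Int)) (maxlen : Int), Dom_form_sequence data maxlen → Pre_form_sequence data maxlen → Spec_form_sequence data maxlen (form_sequence data maxlen)

-- ===== LEMMAS AND PROOFS =====

-- one grouping step with the 'insert [] if missing' guard equals a plain Dict.modify step
lemma pvStep_eq (d : PySem.Dict Int (List (Int × Int))) (u : Int) (x : Int × Int) :
    (if d.contains u then d else d.insert u []).modify u [] (fun l => l ++ [x])
      = d.modify u [] (fun l => l ++ [x]) := by
  cases hc : d.contains u with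
  | true => simp
  | false =>
    have hany : (d.items.any fun p => p.1 == u) = false := by
      simpa [PySem.Dict.contains] using hc
    have hmem : ∀ p ∈ d.items, (p.1 == u) = false := by
      intro p hp
      by_contra h
      rw [List.any_eq_false] at hany
      exact (hany p hp) (by simpa using h)
    have hmap : d.items.map (fun p => if p.1 = u then (u, [x]) else p) = d.items := by
      rw [List.map_congr_left (g := fun p => p)
        (fun p hp => by simp [show ¬ p.1 = u by simpa using hmem p hp])]
      exact List.map_id' d.items
    simp only [Bool.false_eq_true, if_false, PySem.Dict.modify,
      PySem.Dict.getD_insert_self]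
    rw [PySem.Dict.getD_of_not_contains d _ hc]
    apply PySem.Dict.ext
    simp only [PySem.Dict.insert, PySem.Dict.contains, hany]
    simp [List.map_append, hmap]

lemma pvGroup_eq_modify (data : List (Int × Int × Int)) :
    pvAGroup data
      = (data.map (fun y => (y.1, (y.2.1, y.2.2)))).foldl
          (fun d p => d.modify p.1 [] (fun l => l ++ [p.2])) PySem.Dict.empty := by
  unfold pvAGroup
  rw [List.foldl_map]
  exact PySem.List.foldl_congr_mem data _ _ _ (fun acc y _ => pvStep_eq acc y.1 (y.2.1, y.2.2))

-- every (u, g) in the grouping dict: g is the list of this user's (item, week) pairs, in order, and is nonempty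
lemma pvGroup_items_char (data : List (Int × Int × Int)) {u : Int} {g : List (Int × Int)}
    (h : (u, g) ∈ (pvAGroup data).items) :
    g = ((data.map (fun y => (y.1, (y.2.1, y.2.2)))).filter (fun p => p.1 == u)).map (fun p => p.2)
      ∧ g ≠ [] := by
  rw [pvGroup_eq_modify] at h
  have hnd : ((data.map (fun y => (y.1, (y.2.1, y.2.2)))).foldl
      (fun d p => d.modify p.1 [] (fun l => l ++ [p.2])) PySem.Dict.empty).keys.Nodup :=
    PySem.Dict.nodup_keys_foldl_modify_key _ (fun p : Int × (Int × Int) => p.1) []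
      (fun _ p l => l ++ [p.2]) _
      (by rw [PySem.Dict.keys_empty]; exact List.nodup_nil)
  have hg : g = ((data.map (fun y => (y.1, (y.2.1, y.2.2)))).filter (fun p => p.1 == u)).map (fun p => p.2) := by
    have := PySem.Dict.getD_of_mem_items _ h hnd []
    rw [PySem.Dict.getD_foldl_modify_append] at this
    simpa [PySem.Dict.getD_empty] using this.symm
  refine ⟨hg, ?_⟩
  have hk := PySem.Dict.mem_keys_of_mem_items _ h
  rw [PySem.Dict.keys_foldl_modify_key] at hk
  have hk' : u ∈ (data.map (fun y => (y.1, (y.2.1, y.2.2)))).map Prod.fst := by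
    have he : PySem.Set.update (PySem.Dict.empty : PySem.Dict Int (List (Int × Int))).keys
        ((data.map (fun y => (y.1, (y.2.1, y.2.2)))).map Prod.fst)
        = PySem.Set.ofList ((data.map (fun y => (y.1, (y.2.1, y.2.2)))).map Prod.fst) := rfl
    rw [he] at hk
    exact (PySem.Set.mem_ofList _ u).mp hk
  rw [List.map_map] at hk'
  obtain ⟨y, hy, hyu⟩ := List.mem_map.mp hk'
  intro hnil
  rw [hg] at hnil
  have hfil : (y.1, (y.2.1, y.2.2))
      ∈ (data.map (fun y => (y.1, (y.2.1, y.2.2)))).filter (fun p => p.1 == u) :=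
    List.mem_filter.mpr ⟨List.mem_map_of_mem hy, by simpa using hyu⟩
  rw [List.map_eq_nil_iff.mp hnil] at hfil
  exact List.not_mem_nil hfil

-- inserting a mapped element into a mapped list commutes with the map
lemma pvInsertBy_map {α β : Type} (f : α → β) (before : β → β → Bool) (x : α) (ys : List α) :
    PySem.List.insertBy before (f x) (ys.map f)
      = (PySem.List.insertBy (fun a b => before (f a) (f b)) x ys).map f := by
  induction ys with
  | nil => simp [PySem.List.insertBy]
  | cons y ys ih =>
    simp only [PySem.List.insertBy, List.map_cons]
    split_ifs <;> simp [ih]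

-- stable sort commutes with a projection applied to the elements
lemma pvSorted_map {α β κ : Type} [LinearOrder κ] (l : List α) (f : α → β) (k : β → κ) :
    PySem.List.sorted (l.map f) k = (PySem.List.sorted l (fun x => k (f x))).map f := by
  rw [PySem.List.sorted_eq_foldl_insertBy, PySem.List.sorted_eq_foldl_insertBy]
  have key : ∀ (l : List α) (acc : List α),
      (l.map f).foldl (fun acc x => PySem.List.insertBy (fun a b => decide (k a < k b)) x acc)
          (acc.map f)
        = (l.foldl (fun acc x =>
            PySem.List.insertBy (fun a b => decide (k (f a) < k (f b))) x acc) acc).map f := by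
    intro l
    induction l with
    | nil => intro acc; simp
    | cons x l ih =>
      intro acc
      simp only [List.map_cons, List.foldl_cons]
      rw [pvInsertBy_map]
      exact ih _
  exact key l []

-- A's while loop produces exactly B's chunk list of the projected items, appended to dd
lemma pvAWhile_chunks (m u : Int) :
    ∀ (fuel : Nat) (tmp : List (Int × Int)) (dd : List (Int × List Int)),
      tmp ≠ [] →
      ((tmp.length : Int) ≤ m ∨ (5 ≤ m ∧ m ≠ 10)) →
      pvAWhile m u fuel tmp dd
        = dd ++ (pvBChunks m fuel (tmp.map (fun x => x.1))).map (fun c => (u, c)) := by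
  intro fuel
  induction fuel with
  | zero => intro tmp dd _ _; simp [pvAWhile, pvBChunks]
  | succ fuel ih =>
    intro tmp dd hne hc
    have hlen0 : 0 < tmp.length := List.length_pos_of_ne_nil hne
    have hm1 : 1 ≤ m := by
      rcases hc with h | ⟨h5, _⟩
      · have h1 : (1 : Int) ≤ (tmp.length : Int) := by exact_mod_cast hlen0
        omega
      · omega
    by_cases hle : (tmp.length : Int) ≤ m
    · -- final chunk: the whole remaining list
      have hfull : PySem.List.slice (tmp.map (fun x => x.1)) none (some m)
          = tmp.map (fun x => x.1) := by
        rw [PySem.List.slice_to _ (by omega : (0:Int) ≤ m)]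
        exact List.take_of_length_le (by simp; omega)
      have hp : 0 < (PySem.List.slice (tmp.map (fun x => x.1)) none (some m)).length := by
        rw [hfull]; simpa using hlen0
      simp only [pvAWhile, pvBChunks, List.length_map, if_pos hle, hfull]
      simp [hne]
    · have hm510 : 5 ≤ m ∧ m ≠ 10 := by
        rcases hc with h | h
        · omega
        · exact h
      have hp : 0 < (PySem.List.slice (tmp.map (fun x => x.1)) none (some m)).length := by
        rw [PySem.List.slice_to _ (by omega : (0:Int) ≤ m)]
        simp only [List.length_take, List.length_map]
        omega
      simp only [pvAWhile, pvBChunks, List.length_map, if_neg hle, if_pos hp]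
      by_cases h7 : (tmp.length : Int) - m ≤ 7
      · simp only [if_pos h7]
        by_cases h10 : 10 ≤ m
        · -- maxlen ≥ 11: drop maxlen - 10 elements
          have h11 : 11 ≤ m := by omega
          have hdropA : PySem.List.slice tmp (some (m - 10)) none = tmp.drop (m - 10).toNat :=
            PySem.List.slice_from _ (by omega)
          have hdropB : PySem.List.slice (tmp.map (fun x => x.1)) (some (m - 10)) none
              = (tmp.drop (m - 10).toNat).map (fun x => x.1) := by
            rw [PySem.List.slice_from _ (by omega), List.map_drop]
          have hne' : tmp.drop (m - 10).toNat ≠ [] :=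
            List.ne_nil_of_length_pos (by simp only [List.length_drop]; omega)
          rw [hdropA, hdropB, ih _ _ hne' (Or.inr hm510)]
          simp
        · -- 5 ≤ maxlen ≤ 9: keep the last (10 - maxlen) elements
          have hkk : 0 < (10 - m).toNat := by omega
          have hmk : m - 10 = -(((10 - m).toNat : Nat) : Int) := by omega
          have hdropA : PySem.List.slice tmp (some (m - 10)) none
              = tmp.drop (tmp.length - (10 - m).toNat) := by
            rw [PySem.List.slice_some_none, hmk, PySem.List.clampIdx_neg_natCast _ _ hkk]
          have hdropB : PySem.List.slice (tmp.map (fun x => x.1)) (some (m - 10)) none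
              = (tmp.drop (tmp.length - (10 - m).toNat)).map (fun x => x.1) := by
            rw [PySem.List.slice_some_none, hmk, PySem.List.clampIdx_neg_natCast _ _ hkk,
              List.length_map, List.map_drop]
          have hne' : tmp.drop (tmp.length - (10 - m).toNat) ≠ [] :=
            List.ne_nil_of_length_pos (by simp only [List.length_drop]; omega)
          rw [hdropA, hdropB, ih _ _ hne' (Or.inr hm510)]
          simp
      · simp only [if_neg h7]
        have hdropA : PySem.List.slice tmp (some m) none = tmp.drop m.toNat :=
          PySem.List.slice_from _ (by omega)
        have hdropB : PySem.List.slice (tmp.map (fun x => x.1)) (some m) none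
            = (tmp.drop m.toNat).map (fun x => x.1) := by
          rw [PySem.List.slice_from _ (by omega), List.map_drop]
        have hne' : tmp.drop m.toNat ≠ [] :=
          List.ne_nil_of_length_pos (by simp only [List.length_drop]; omega)
        rw [hdropA, hdropB, ih _ _ hne' (Or.inr hm510)]
        simp

-- B's per-user item list, computed from A's grouped-and-sorted pairs
lemma pvItems_eq (data : List (Int × Int × Int)) (u : Int) (g : List (Int × Int))
    (hg : g = ((data.map (fun y => (y.1, (y.2.1, y.2.2)))).filter (fun p => p.1 == u)).map
        (fun p => p.2)) :
    (PySem.List.sorted g (fun x => x.2)).map (fun x => x.1) = pvBItems data u := by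
  have hfil : (data.map (fun y => (y.1, (y.2.1, y.2.2)))).filter (fun p => p.1 == u)
      = (data.filter (fun t => t.1 == u)).map (fun y => (y.1, (y.2.1, y.2.2))) := by
    rw [List.filter_map]
    rfl
  have hg' : g = (data.filter (fun t => t.1 == u)).map (fun t => (t.2.1, t.2.2)) := by
    rw [hg, hfil, List.map_map]
    rfl
  rw [hg', pvSorted_map (data.filter (fun t => t.1 == u)) (fun t => (t.2.1, t.2.2))
    (fun x => x.2), List.map_map]
  rfl

-- ===== VERDICT (by name: the statement is the Claim_ definition above) =====
theorem form_sequence_spec : Claim_equal_form_sequence := by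
  intro data maxlen _ hpre
  unfold Spec_form_sequence form_sequence form_sequence_alt
  -- B's first-appearance order list is exactly the key list of A's grouping dict
  have horder : data.foldl (fun o y => if o.contains y.1 then o else o ++ [y.1]) ([] : List Int)
      = (pvAGroup data).items.map (fun p => p.1) := by
    have h1 : data.foldl (fun o y => if o.contains y.1 then o else o ++ [y.1]) ([] : List Int)
        = (data.map (fun y => y.1)).foldl PySem.Set.add [] := by
      rw [List.foldl_map]
      rfl
    have h2 : (pvAGroup data).keys = PySem.Set.ofList (data.map (fun y => y.1)) := by
      rw [pvGroup_eq_modify,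
        PySem.Dict.keys_foldl_modify_key _ (fun p : Int × (Int × Int) => p.1)]
      rw [PySem.Dict.keys_empty, List.map_map]
      rfl
    rw [h1]
    have h3 : PySem.Set.ofList (data.map (fun y => y.1))
        = (data.map (fun y => y.1)).foldl PySem.Set.add [] := PySem.Set.ofList_eq_foldl _
    rw [← h3, ← h2]
    rfl
  -- A's foldl over groups appends exactly B's per-user chunk lists
  have hstep : (pvAGroup data).items.foldl
      (fun dd p =>
        let tmp := PySem.List.sorted p.2 (fun x => x.2)
        pvAWhile maxlen p.1 (tmp.length + 1) tmp dd) []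
      = (pvAGroup data).items.foldl
        (fun dd p => dd ++ (pvBChunks maxlen ((pvBItems data p.1).length + 1)
          (pvBItems data p.1)).map (fun c => (p.1, c))) [] := by
    apply PySem.List.foldl_congr_mem
    intro acc p hp
    obtain ⟨u, g⟩ := p
    obtain ⟨hg, hgne⟩ := pvGroup_items_char data hp
    have hmap : (PySem.List.sorted g (fun x : Int × Int => x.2)).map (fun x => x.1)
        = pvBItems data u := pvItems_eq data u g hg
    have hlen : (PySem.List.sorted g (fun x : Int × Int => x.2)).length = g.length :=
      (PySem.List.sorted_perm g _ false).length_eq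
    have hne : PySem.List.sorted g (fun x : Int × Int => x.2) ≠ [] := by
      intro h0
      exact hgne ((PySem.List.sorted_eq_nil_iff _ _ _).mp h0)
    have hc : ((PySem.List.sorted g (fun x : Int × Int => x.2)).length : Int) ≤ maxlen
        ∨ (5 ≤ maxlen ∧ maxlen ≠ 10) := by
      rcases hpre with h | h
      · exact Or.inr h
      · left
        have hcnt : g.length = data.countP (fun z => z.1 == u) := by
          rw [hg, List.length_map, ← List.countP_eq_length_filter, List.countP_map]
          rfl
        have hfne : (data.map (fun y => (y.1, (y.2.1, y.2.2)))).filter (fun p => p.1 == u) ≠ [] := by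
          intro h0
          exact hgne (by rw [hg, h0]; rfl)
        obtain ⟨q, hq, hqu⟩ : ∃ q ∈ data, q.1 = u := by
          obtain ⟨p', hp'⟩ := List.exists_mem_of_ne_nil _ hfne
          obtain ⟨hp'm, hp'u⟩ := List.mem_filter.mp hp'
          obtain ⟨y, hy, hyy⟩ := List.mem_map.mp hp'm
          refine ⟨y, hy, ?_⟩
          have h2 : p'.1 = u := by simpa using hp'u
          rw [← hyy] at h2
          simpa using h2
        have hcu := h q hq
        rw [hqu] at hcu
        rw [hlen, hcnt]
        exact hcu
    have hthis := pvAWhile_chunks maxlen u ((pvBItems data u).length + 1)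
      (PySem.List.sorted g (fun x : Int × Int => x.2)) acc hne hc
    rw [hmap] at hthis
    have hlen2 : (PySem.List.sorted g (fun x : Int × Int => x.2)).length
        = (pvBItems data u).length := by
      rw [← hmap, List.length_map]
    show pvAWhile maxlen u ((PySem.List.sorted g (fun x : Int × Int => x.2)).length + 1)
        (PySem.List.sorted g (fun x : Int × Int => x.2)) acc
      = acc ++ (pvBChunks maxlen ((pvBItems data u).length + 1) (pvBItems data u)).map
          (fun c => (u, c))
    rw [hlen2]
    exact hthis
  rw [hstep, PySem.List.foldl_append_eq_flatMap, horder]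
  simp only [List.nil_append, List.flatMap_map]
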